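-- pv_equiv track=rewrite | github.com/387809109/demo_boardgame | his_ref/rulebook_extraction/normalize_rulebook_sections.py | compact_lines
-- ===== SOURCE A (Python) =====
-- from typing import Dict, List, Tuple
--
-- def compact_lines(lines: List[str]) -> List[str]:
--     out: List[str] = []
--     prev = None
--     blank = False
--     for ln in lines:
--         if ln == "":
--             if not blank and out:
--                 out.append("")
--             blank = True
--             prev = None
--             continue
--         if prev == ln:
--             continue
--         out.append(ln)
--         prev = ln
--         blank = False
--     while out and out[-1] == "":
--         out.pop()
--     return out
-- ===== SOURCE B (Python) =====
-- from itertools import groupby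
-- from typing import List
--
-- def compact_lines(lines: List[str]) -> List[str]:
--     # collapse every run of consecutive equal lines (blank runs and duplicates)
--     res = [k for k, _ in groupby(lines)]
--     start = 0
--     while start < len(res) and res[start] == "":
--         start += 1
--     end = len(res)
--     while end > start and res[end - 1] == "":
--         end -= 1
--     return res[start:end]
-- ===== Notes on version B (the rewrite author's own statement) =====
-- stated objective: idiomatic
-- what changed: Replaces the interleaved prev/blank state machine with a groupby collapse of all consecutive-equal runs followed by a separate leading/trailing blank trim pass.
import Mathlib
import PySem

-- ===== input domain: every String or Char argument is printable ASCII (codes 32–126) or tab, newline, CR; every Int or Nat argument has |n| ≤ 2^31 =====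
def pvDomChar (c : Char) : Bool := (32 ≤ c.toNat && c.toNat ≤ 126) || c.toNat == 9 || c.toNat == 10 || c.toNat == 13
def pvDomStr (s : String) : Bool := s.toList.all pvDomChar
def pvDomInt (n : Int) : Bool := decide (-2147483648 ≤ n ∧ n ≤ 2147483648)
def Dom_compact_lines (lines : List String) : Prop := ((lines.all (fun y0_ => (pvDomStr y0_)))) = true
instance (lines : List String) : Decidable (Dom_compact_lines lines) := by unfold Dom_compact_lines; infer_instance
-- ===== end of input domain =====

-- B: same collapse of blank runs and consecutive duplicates, written as a groupby-style
-- run-collapse pass followed by a separate leading/trailing blank trim (idiomatic decomposition).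


-- ===== PORT A =====
-- the for-loop over `lines` with state (out, prev, blank); `if not blank and out: out.append("")`
def loopA : List String → List String → Option String → Bool → List String
  | [], out, _, _ => out
  | ln :: rest, out, prev, blank =>
    if ln = "" then
      loopA rest (if blank = false ∧ out ≠ [] then out ++ [""] else out) none true
    else if prev = some ln then
      loopA rest out prev blank
    else
      loopA rest (out ++ [ln]) (some ln) false

-- the `while out and out[-1] == "": out.pop()` loop
def popBlanks (out : List String) : List String :=
  match h : out.getLast? with
  | some s => if s = "" then popBlanks out.dropLast else out
  | none => out
termination_by out.length
decreasing_by
  cases out with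
  | nil => simp at h
  | cons a l => simp

def compact_lines (lines : List String) : List String :=
  popBlanks (loopA lines [] none false)

-- ===== PORT B =====
-- [k for k, _ in groupby(lines)] : keep one representative per run of consecutive equal lines
def grp : List String → List String
  | [] => []
  | [x] => [x]
  | x :: y :: xs => if x = y then grp (y :: xs) else x :: grp (y :: xs)

-- the `while end > start and res[end-1] == ""` walk + slice: drop trailing empty strings
def dropEndB : List String → List String
  | [] => []
  | x :: xs =>
    match dropEndB xs with
    | [] => if x = "" then [] else [x]
    | r => x :: r

def compact_lines_alt (lines : List String) : List String :=
  dropEndB (((grp lines).dropWhile (· == "")))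

-- ===== PRECONDITION & SPEC =====
def Spec_compact_lines (lines : List String) (out : List String) : Prop := out = compact_lines_alt lines
instance (lines : List String) (out : List String) : Decidable (Spec_compact_lines lines out) := by unfold Spec_compact_lines; infer_instance

-- ===== CLAIM (what is proved, stated in full; the proofs are below) =====
def Claim_equal_compact_lines : Prop := ∀ (lines : List String), Dom_compact_lines lines → Spec_compact_lines lines (compact_lines lines)

-- ===== LEMMAS AND PROOFS =====

-- the suffix A's loop appends once `out` is nonempty
def gA : List String → Option String → Bool → List String
  | [], _, _ => []
  | ln :: rest, prev, blank =>
    if ln = "" then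
      (if blank = false then "" :: gA rest none true else gA rest none true)
    else if prev = some ln then
      gA rest prev blank
    else
      ln :: gA rest (some ln) false

theorem loopA_cons (ln : String) (rest out : List String) (prev : Option String) (blank : Bool) :
    loopA (ln :: rest) out prev blank =
      if ln = "" then
        loopA rest (if blank = false ∧ out ≠ [] then out ++ [""] else out) none true
      else if prev = some ln then
        loopA rest out prev blank
      else
        loopA rest (out ++ [ln]) (some ln) false := rfl

theorem gA_cons (ln : String) (rest : List String) (prev : Option String) (blank : Bool) :
    gA (ln :: rest) prev blank =
      if ln = "" then
        (if blank = false then "" :: gA rest none true else gA rest none true)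
      else if prev = some ln then
        gA rest prev blank
      else
        ln :: gA rest (some ln) false := rfl

theorem loopA_nonempty (rest : List String) : ∀ (out : List String) (prev : Option String) (blank : Bool),
    out ≠ [] → loopA rest out prev blank = out ++ gA rest prev blank := by
  induction rest with
  | nil => intro out prev blank _; simp [loopA, gA]
  | cons ln xs ih =>
    intro out prev blank hne
    rw [loopA_cons, gA_cons]
    by_cases h1 : ln = ""
    · rw [if_pos h1, if_pos h1]
      cases blank with
      | false =>
        rw [if_pos ⟨rfl, hne⟩, if_pos rfl, ih _ _ _ (by simp)]
        simp
      | true =>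
        rw [if_neg (by simp), if_neg (by simp), ih _ _ _ hne]
    · rw [if_neg h1, if_neg h1]
      by_cases h2 : prev = some ln
      · rw [if_pos h2, if_pos h2]; exact ih _ _ _ hne
      · rw [if_neg h2, if_neg h2, ih _ _ _ (by simp)]
        simp

theorem grp_cons_cons (x y : String) (xs : List String) :
    grp (x :: y :: xs) = if x = y then grp (y :: xs) else x :: grp (y :: xs) := rfl

theorem grp_head (xs : List String) : ∀ (a : String), grp (a :: xs) = a :: (grp (a :: xs)).tail := by
  induction xs with
  | nil => intro a; simp [grp]
  | cons y ys ih =>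
    intro a
    rw [grp_cons_cons]
    by_cases h : a = y
    · rw [if_pos h]; subst h; exact ih _
    · rw [if_neg h]; simp

theorem gA_grp (xs : List String) :
    (∀ p, p ≠ "" → gA xs (some p) false = (grp (p :: xs)).tail) ∧
    (gA xs none true = (grp ("" :: xs)).tail) := by
  induction xs with
  | nil => exact ⟨fun p _ => by simp [gA, grp], by simp [gA, grp]⟩
  | cons ln rest ih =>
    by_cases h1 : ln = ""
    · subst h1
      constructor
      · intro p hp
        rw [gA_cons, if_pos rfl, if_pos rfl, grp_cons_cons, if_neg hp, List.tail_cons, ih.2]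
        exact (grp_head rest "").symm
      · rw [gA_cons, if_pos rfl, if_neg (by simp), grp_cons_cons, if_pos rfl]
        exact ih.2
    · constructor
      · intro p hp
        by_cases h2 : p = ln
        · subst h2
          rw [gA_cons, if_neg h1, if_pos rfl, grp_cons_cons, if_pos rfl]
          exact ih.1 p hp
        · rw [gA_cons, if_neg h1, if_neg (by simp [h2]), grp_cons_cons, if_neg h2, List.tail_cons,
            ih.1 ln h1]
          exact (grp_head rest ln).symm
      · rw [gA_cons, if_neg h1, if_neg (by simp), grp_cons_cons,
          if_neg (fun e => h1 e.symm), List.tail_cons, ih.1 ln h1]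
        exact (grp_head rest ln).symm

theorem loopA_empty (lines : List String) : ∀ (b : Bool),
    loopA lines [] none b = grp (lines.dropWhile (· == "")) := by
  induction lines with
  | nil => intro b; simp [loopA, grp]
  | cons ln xs ih =>
    intro b
    rw [loopA_cons]
    by_cases h1 : ln = ""
    · rw [if_pos h1, if_neg (by simp), ih true]
      subst h1
      simp [List.dropWhile]
    · rw [if_neg h1, if_neg (by simp), List.nil_append,
        loopA_nonempty xs [ln] (some ln) false (by simp)]
      have h2 : (ln == "") = false := by simp [h1]
      rw [List.dropWhile_cons, h2]
      simp only [Bool.false_eq_true, if_neg (by simp : ¬ (False : Prop))]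
      calc [ln] ++ gA xs (some ln) false = ln :: (grp (ln :: xs)).tail := by
            rw [(gA_grp xs).1 ln h1]; rfl
        _ = grp (ln :: xs) := (grp_head xs ln).symm

theorem dropWhile_grp (L : List String) :
    (grp L).dropWhile (· == "") = grp (L.dropWhile (· == "")) := by
  induction L with
  | nil => simp [grp]
  | cons a xs ih =>
    by_cases ha : a = ""
    · subst ha
      cases xs with
      | nil => simp [grp, List.dropWhile]
      | cons y ys =>
        by_cases hy : y = ""
        · subst hy
          rw [grp_cons_cons, if_pos rfl, ih]
          simp [List.dropWhile]
        · rw [grp_cons_cons, if_neg (fun e => hy e.symm), List.dropWhile_cons]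
          simp only [beq_self_eq_true, if_pos trivial, ih]
          simp [hy]
    · have h2 : (a == "") = false := by simp [ha]
      conv_lhs => rw [grp_head xs a]
      rw [List.dropWhile_cons, h2, List.dropWhile_cons, h2]
      simp only [Bool.false_eq_true, if_neg (by simp : ¬ (False : Prop))]
      exact (grp_head xs a).symm

theorem dropEndB_append_blank (ys : List String) : dropEndB (ys ++ [""]) = dropEndB ys := by
  induction ys with
  | nil => simp [dropEndB]
  | cons y ys ih => simp only [List.cons_append, dropEndB, ih]

theorem dropEndB_append_nonblank (ys : List String) (x : String) (hx : x ≠ "") :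
    dropEndB (ys ++ [x]) = ys ++ [x] := by
  induction ys with
  | nil => simp [dropEndB, hx]
  | cons y ys ih =>
    simp only [List.cons_append, dropEndB, ih]
    cases hys : ys ++ [x] with
    | nil => exact absurd hys (by simp)
    | cons a l => rfl

theorem popBlanks_concat (ys : List String) (x : String) :
    popBlanks (ys ++ [x]) = if x = "" then popBlanks ys else ys ++ [x] := by
  rw [popBlanks]
  split
  next s hs =>
    simp only [List.getLast?_concat, Option.some.injEq] at hs
    subst hs
    rw [List.dropLast_concat]
  next hs => simp at hs

theorem popBlanks_eq_dropEndB (M : List String) : popBlanks M = dropEndB M := by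
  induction M using List.reverseRecOn with
  | nil => simp [popBlanks, dropEndB]
  | append_singleton ys x ih =>
    rw [popBlanks_concat]
    by_cases hx : x = ""
    · subst hx
      rw [if_pos rfl, ih, dropEndB_append_blank]
    · rw [if_neg hx, dropEndB_append_nonblank ys x hx]

-- ===== VERDICT (by name: the statement is the Claim_ definition above) =====
theorem compact_lines_spec : Claim_equal_compact_lines := by
  intro lines _
  unfold Spec_compact_lines compact_lines compact_lines_alt
  rw [loopA_empty lines false, popBlanks_eq_dropEndB, ← dropWhile_grp]
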